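-- pv_equiv track=rewrite | github.com/KeDaCoYa/MKG-GC | entity_extraction/multi_ner_predicate.py | post_preprocess_entities
-- ===== SOURCE A (Python) =====
-- from collections import defaultdict
--
-- def post_preprocess_entities(entities_li):
--     """
--     这是以一个abstract的为单位进行,对抽取到的实体进行检查
--     相当于是一个投票法进行
--      {
--         'entity_type': span_id2label[s_type],
--         'start_idx': str(i),
--         'end_idx': str(i+j),
--         'entity_name': " ".join(raw_text_li[id][i:i+j+1])
--     }
--     """
--     entities_dict = defaultdict(lambda: defaultdict(int))
--     for ent in entities_li:
--         ent_name = ent['entity_name']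
--         ent_type = ent['entity_type']
--         entities_dict[ent_name][ent_type] += 1
--     new_entities_li = []
--     count = 0
--
--     for ent in entities_li:
--         ent_name = ent['entity_name']
--         ent_types_li_dict = entities_dict[ent_name]
--
--         if len(ent_types_li_dict) > 1:
--             more_ent_type = sorted(ent_types_li_dict.items(), key=lambda x: x[1], reverse=True)[0]
--             if more_ent_type[1] > 1:
--                 ent['entity_type'] = more_ent_type[0]
--                 count += 1
--         new_entities_li.append(ent)
--
--
--     return new_entities_li
-- ===== SOURCE B (Python) =====
-- def post_preprocess_entities(entities_li):
--     # one pass to count (name -> type -> occurrences)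
--     counts = {}
--     for ent in entities_li:
--         inner = counts.setdefault(ent['entity_name'], {})
--         t = ent['entity_type']
--         inner[t] = inner.get(t, 0) + 1
--     # one pass over the unique names: pick the winning type per ambiguous name
--     winners = {}
--     for name, types in counts.items():
--         if len(types) > 1:
--             best_type, best_count = max(types.items(), key=lambda x: x[1])
--             if best_count > 1:
--                 winners[name] = best_type
--     # relabel in place; per entity this is now a plain dict lookup
--     for ent in entities_li:
--         w = winners.get(ent['entity_name'])
--         if w is not None:
--             ent['entity_type'] = w
--     return entities_li
-- ===== Notes on version B (the rewrite author's own statement) =====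
-- stated objective: faster
-- what changed: B computes the winning type once per unique name (a single max scan over the counts table) and then relabels entities with a plain dict lookup, instead of A's re-sorting the type-count dict for every entity occurrence; Pre_ excludes entity dicts missing the 'entity_name'/'entity_type' keys (A raises KeyError there, B too) and association lists with duplicate keys, which do not represent a Python dict.
import Mathlib
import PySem

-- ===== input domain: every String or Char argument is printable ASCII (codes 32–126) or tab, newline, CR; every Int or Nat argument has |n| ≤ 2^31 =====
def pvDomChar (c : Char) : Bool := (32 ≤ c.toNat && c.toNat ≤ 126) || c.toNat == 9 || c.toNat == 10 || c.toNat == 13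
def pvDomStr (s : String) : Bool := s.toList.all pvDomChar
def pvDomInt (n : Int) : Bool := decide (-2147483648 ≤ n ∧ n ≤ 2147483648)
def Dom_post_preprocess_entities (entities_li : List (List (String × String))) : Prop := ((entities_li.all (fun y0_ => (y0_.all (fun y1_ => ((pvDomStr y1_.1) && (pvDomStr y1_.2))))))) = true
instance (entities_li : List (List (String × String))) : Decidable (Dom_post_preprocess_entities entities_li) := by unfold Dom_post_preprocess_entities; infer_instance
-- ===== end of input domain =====

-- ===== PORT A =====
-- B precomputes one winner per unique name instead of sorting the type counts per entity
-- occurrence; return-value equivalence only (both Pythons relabel the entity dicts in place).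
-- shared tiny helper: ent[k] for an entity dict (KeyError excluded by Pre_, so the "" default is never used there)
def pvEntGet (ent : List (String × String)) (k : String) : String :=
  ((PySem.Dict.mk ent).get? k).getD ""

def post_preprocess_entities (entities_li : List (List (String × String))) : List (List (String × String)) :=
  -- entities_dict = defaultdict(lambda: defaultdict(int)); entities_dict[name][type] += 1
  let entities_dict : PySem.Dict String (PySem.Dict String Int) :=
    entities_li.foldl (fun d ent =>
      d.modify (pvEntGet ent "entity_name") PySem.Dict.empty
        (fun inner => inner.modify (pvEntGet ent "entity_type") (0 : Int) (· + 1)))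
      PySem.Dict.empty
  -- second loop: per entity, sort the type counts descending and maybe relabel
  entities_li.foldl (fun new_entities_li ent =>
    let ent_types_li_dict := entities_dict.getD (pvEntGet ent "entity_name") PySem.Dict.empty
    let ent' :=
      if 1 < ent_types_li_dict.size then
        match PySem.List.sorted ent_types_li_dict.items (fun x => x.2) true with
        | more_ent_type :: _ =>
            if 1 < more_ent_type.2 then
              ((PySem.Dict.mk ent).insert "entity_type" more_ent_type.1).items
            else ent
        | [] => ent
      else ent
    new_entities_li ++ [ent']) []

-- ===== PORT B =====
def post_preprocess_entities_alt (entities_li : List (List (String × String))) : List (List (String × String)) :=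
  -- counts: name -> (type -> occurrences), built with setdefault/get
  let counts : PySem.Dict String (PySem.Dict String Int) :=
    entities_li.foldl (fun d ent =>
      let inner := d.getD (pvEntGet ent "entity_name") PySem.Dict.empty
      let t := pvEntGet ent "entity_type"
      d.insert (pvEntGet ent "entity_name") (inner.insert t (inner.getD t 0 + 1)))
      PySem.Dict.empty
  -- winners: one max scan per unique name
  let winners : PySem.Dict String String :=
    counts.items.foldl (fun w p =>
      if 1 < p.2.size then
        match PySem.List.max? p.2.items (fun x => x.2) with
        | some best => if 1 < best.2 then w.insert p.1 best.1 else w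
        | none => w
      else w) PySem.Dict.empty
  -- relabel: plain lookup per entity
  entities_li.map (fun ent =>
    match winners.get? (pvEntGet ent "entity_name") with
    | some t => ((PySem.Dict.mk ent).insert "entity_type" t).items
    | none => ent)

-- ===== PRECONDITION & SPEC =====
-- Pre_ excludes entity dicts missing the 'entity_name' or 'entity_type' key (Python A raises
-- KeyError there, and so does B) and association lists with duplicate keys, which do not
-- represent a Python dict at all.
def Pre_post_preprocess_entities (entities_li : List (List (String × String))) : Prop :=
  ∀ ent ∈ entities_li, (ent.map Prod.fst).Nodup ∧
    "entity_name" ∈ ent.map Prod.fst ∧ "entity_type" ∈ ent.map Prod.fst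
instance (entities_li : List (List (String × String))) : Decidable (Pre_post_preprocess_entities entities_li) := by
  unfold Pre_post_preprocess_entities; infer_instance
def pvWitness_post_preprocess_entities : (List (List (String × String))) :=
  [[("entity_name", "p53"), ("entity_type", "gene")],
   [("entity_name", "p53"), ("entity_type", "protein")],
   [("entity_name", "p53"), ("entity_type", "gene")]]

def Spec_post_preprocess_entities (entities_li : List (List (String × String))) (out : List (List (String × String))) : Prop := out = post_preprocess_entities_alt entities_li
instance (entities_li : List (List (String × String))) (out : List (List (String × String))) : Decidable (Spec_post_preprocess_entities entities_li out) := by unfold Spec_post_preprocess_entities; infer_instance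

-- ===== CLAIM (what is proved, stated in full; the proofs are below) =====
def Claim_equal_post_preprocess_entities : Prop := ∀ (entities_li : List (List (String × String))), Dom_post_preprocess_entities entities_li → Pre_post_preprocess_entities entities_li → Spec_post_preprocess_entities entities_li (post_preprocess_entities entities_li)

-- ===== LEMMAS AND PROOFS =====

-- the counts step both ports perform (A via Dict.modify, B via getD/insert)
def pvCStep (d : PySem.Dict String (PySem.Dict String Int)) (ent : List (String × String)) :
    PySem.Dict String (PySem.Dict String Int) :=
  let inner := d.getD (pvEntGet ent "entity_name") PySem.Dict.empty
  d.insert (pvEntGet ent "entity_name")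
    (inner.insert (pvEntGet ent "entity_type") (inner.getD (pvEntGet ent "entity_type") 0 + 1))

-- the per-name winner B records
def pvBest (td : PySem.Dict String Int) : Option String :=
  if 1 < td.size then
    match PySem.List.max? td.items (fun x => x.2) with
    | some best => if 1 < best.2 then some best.1 else none
    | none => none
  else none

def pvWStep (w : PySem.Dict String String) (p : String × PySem.Dict String Int) :
    PySem.Dict String String :=
  match pvBest p.2 with
  | some t => w.insert p.1 t
  | none => w

-- A's per-entity transform (on the shared counts table) and B's (on the winners table)
def pvA (C : PySem.Dict String (PySem.Dict String Int)) (ent : List (String × String)) :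
    List (String × String) :=
  if 1 < (C.getD (pvEntGet ent "entity_name") PySem.Dict.empty).size then
    match PySem.List.sorted (C.getD (pvEntGet ent "entity_name") PySem.Dict.empty).items (fun x => x.2) true with
    | m :: _ => if 1 < m.2 then ((PySem.Dict.mk ent).insert "entity_type" m.1).items else ent
    | [] => ent
  else ent

def pvB (w : PySem.Dict String String) (ent : List (String × String)) :
    List (String × String) :=
  match w.get? (pvEntGet ent "entity_name") with
  | some t => ((PySem.Dict.mk ent).insert "entity_type" t).items
  | none => ent

theorem pvWStep_eq_B (w : PySem.Dict String String) (p : String × PySem.Dict String Int) :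
    (if 1 < p.2.size then
        match PySem.List.max? p.2.items (fun x => x.2) with
        | some best => if 1 < best.2 then w.insert p.1 best.1 else w
        | none => w
      else w) = pvWStep w p := by
  unfold pvWStep pvBest
  split_ifs with h1
  · cases hm : PySem.List.max? p.2.items (fun x => x.2) with
    | none => simp
    | some best => by_cases h2 : 1 < best.2 <;> simp [h2]
  · rfl

-- head of the stable descending sort = Python's max (first maximal element)
theorem head_insertBy (x y : String × Int) (ys : List (String × Int)) :
    (PySem.List.insertBy (fun a b => decide (b.2 < a.2)) x (y :: ys)).head? =
      (if y.2 < x.2 then some x else some y) := by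
  simp only [PySem.List.insertBy]
  split <;> simp_all

theorem head_sorted_foldl (xs : List (String × Int)) :
    ∀ acc : List (String × Int),
      (xs.foldl (fun a x => PySem.List.insertBy (fun a b => decide (b.2 < a.2)) x a) acc).head? =
        xs.foldl (fun (o : Option (String × Int)) x =>
          match o with
          | none => some x
          | some m => if m.2 < x.2 then some x else some m) acc.head? := by
  induction xs with
  | nil => intro acc; rfl
  | cons x t ih =>
    intro acc
    rw [List.foldl_cons, List.foldl_cons, ih]
    congr 1
    cases acc with
    | nil => rfl
    | cons y ys => rw [head_insertBy]; cases h : decide (y.2 < x.2) <;> simp_all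

theorem head_sorted_rev_eq_max? (xs : List (String × Int)) :
    (PySem.List.sorted xs (fun x => x.2) true).head? = PySem.List.max? xs (fun x => x.2) := by
  rw [show PySem.List.sorted xs (fun x : String × Int => x.2) true =
      xs.foldl (fun a x => PySem.List.insertBy (fun a b => decide (b.2 < a.2)) x a) [] from rfl]
  rw [head_sorted_foldl xs []]
  unfold PySem.List.max?
  congr 1
  funext o x
  cases o <;> rfl

-- the counts fold keeps keys it has, and records every entity name
theorem contains_pvCStep_foldl_mono (L : List (List (String × String)))
    (d : PySem.Dict String (PySem.Dict String Int)) (k : String) (h : d.contains k = true) :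
    (L.foldl pvCStep d).contains k = true := by
  induction L generalizing d with
  | nil => exact h
  | cons e t ih =>
    rw [List.foldl_cons]
    exact ih _ (by unfold pvCStep; rw [PySem.Dict.contains_insert]; simp [h])

theorem contains_pvCStep_foldl_name (L : List (List (String × String)))
    (d : PySem.Dict String (PySem.Dict String Int)) (ent : List (String × String))
    (h : ent ∈ L) :
    (L.foldl pvCStep d).contains (pvEntGet ent "entity_name") = true := by
  induction L generalizing d with
  | nil => cases h
  | cons e t ih =>
    rw [List.foldl_cons]
    rcases List.mem_cons.mp h with rfl | hmem
    · exact contains_pvCStep_foldl_mono t _ _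
        (by unfold pvCStep; rw [PySem.Dict.contains_insert]; simp)
    · exact ih _ hmem

theorem nodup_pvCStep_foldl (L : List (List (String × String)))
    (d : PySem.Dict String (PySem.Dict String Int)) (h : d.keys.Nodup) :
    (L.foldl pvCStep d).keys.Nodup := by
  induction L generalizing d with
  | nil => exact h
  | cons e t ih =>
    rw [List.foldl_cons]
    exact ih _ (PySem.Dict.nodup_keys_insert _ _ _ h)

-- looking a name up in the winners table
theorem winners_get (L : List (String × PySem.Dict String Int)) (n : String) :
    ∀ w : PySem.Dict String String, (L.map (fun p => p.1)).Nodup →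
      ((∃ p ∈ L, p.1 = n) → w.get? n = none) →
      (L.foldl pvWStep w).get? n =
        match L.find? (fun p => p.1 == n) with
        | some p => pvBest p.2
        | none => w.get? n := by
  induction L with
  | nil => intro w _ _; rfl
  | cons p t ih =>
    intro w hnd h
    simp only [List.map_cons, List.nodup_cons] at hnd
    rw [List.foldl_cons]
    by_cases hpn : p.1 = n
    · subst hpn
      have hfind : t.find? (fun q => q.1 == p.1) = none := by
        rw [List.find?_eq_none]
        intro q hq
        simp only [beq_iff_eq]
        intro hqn
        exact hnd.1 (by rw [← hqn]; exact List.mem_map_of_mem hq)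
      have hnone : ¬ ∃ q ∈ t, q.1 = p.1 := by
        rintro ⟨q, hq, hqn⟩
        exact hnd.1 (by rw [← hqn]; exact List.mem_map_of_mem hq)
      rw [ih (pvWStep w p) hnd.2 (fun hex => absurd hex hnone), hfind]
      have hf2 : (p :: t).find? (fun q => q.1 == p.1) = some p := by
        simp
      rw [hf2]
      show (pvWStep w p).get? p.1 = pvBest p.2
      unfold pvWStep
      cases hb : pvBest p.2 with
      | some tt => exact PySem.Dict.get?_insert_self w p.1 tt
      | none => exact h ⟨p, List.mem_cons_self, rfl⟩
    · have hw' : (pvWStep w p).get? n = w.get? n := by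
        unfold pvWStep
        cases pvBest p.2 with
        | none => rfl
        | some tt => exact PySem.Dict.get?_insert_of_ne w tt (fun e => hpn e.symm)
      rw [ih (pvWStep w p) hnd.2 (fun ⟨q, hq, hqn⟩ => hw' ▸ h ⟨q, List.mem_cons_of_mem _ hq, hqn⟩)]
      have hf2 : (p :: t).find? (fun q => q.1 == n) = t.find? (fun q => q.1 == n) := by
        simp [hpn]
      rw [hf2]
      cases t.find? (fun q => q.1 == n) <;> simp [hw']

theorem foldl_append_eq_map {α β : Type} (f : α → β) (L : List α) :
    ∀ acc : List β, L.foldl (fun a e => a ++ [f e]) acc = acc ++ L.map f := by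
  induction L with
  | nil => intro acc; simp
  | cons x t ih => intro acc; simp [ih]

-- per-entity agreement over the shared counts table
theorem pvA_eq_pvB (li : List (List (String × String))) (ent : List (String × String))
    (hmem : ent ∈ li) :
    pvA (li.foldl pvCStep PySem.Dict.empty) ent =
      pvB ((li.foldl pvCStep PySem.Dict.empty).items.foldl pvWStep PySem.Dict.empty) ent := by
  set C := li.foldl pvCStep PySem.Dict.empty with hC
  have hcont : C.contains (pvEntGet ent "entity_name") = true :=
    contains_pvCStep_foldl_name li _ ent hmem
  set n := pvEntGet ent "entity_name" with hn
  have hget : ∃ td, C.get? n = some td := by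
    cases hg : C.get? n with
    | some td => exact ⟨td, rfl⟩
    | none =>
      rw [PySem.Dict.get?_eq_none_iff_contains] at hg
      simp [hg] at hcont
  obtain ⟨td, hgtd⟩ := hget
  have hnd : (C.items.map (fun p => p.1)).Nodup :=
    nodup_pvCStep_foldl li _ PySem.Dict.nodup_keys_empty
  have hfind : C.items.find? (fun p => p.1 == n) = some (n, td) := by
    have hgtd' := hgtd
    unfold PySem.Dict.get? at hgtd'
    cases hf : C.items.find? (fun p => p.1 == n) with
    | none => rw [hf] at hgtd'; simp at hgtd'
    | some q =>
      have hq1 : q.1 = n := by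
        have := List.find?_some hf
        simpa using this
      rw [hf] at hgtd'
      simp at hgtd'
      rw [← hq1, ← hgtd']
  have hw : ((C.items.foldl pvWStep PySem.Dict.empty).get? n) = pvBest td := by
    rw [winners_get C.items n PySem.Dict.empty hnd (fun _ => PySem.Dict.get?_empty n), hfind]
  unfold pvA pvB
  rw [← hn, hw]
  have hgd : C.getD n PySem.Dict.empty = td := by
    unfold PySem.Dict.getD; rw [hgtd]; rfl
  rw [hgd]
  cases hs : PySem.List.sorted td.items (fun x => x.2) true with
  | nil =>
    have : td.items = [] := (PySem.List.sorted_eq_nil_iff td.items (fun x => x.2) true).mp hs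
    have hsz : td.size = 0 := by simp [PySem.Dict.size, this]
    unfold pvBest
    rw [hsz]
    simp
  | cons m rest =>
    have hmax : PySem.List.max? td.items (fun x => x.2) = some m := by
      rw [← head_sorted_rev_eq_max?, hs]; rfl
    unfold pvBest
    rw [hmax]
    by_cases h1 : 1 < td.size
    · simp only [if_pos h1]
      by_cases h2 : 1 < m.2 <;> simp [h2]
    · simp [h1]

-- ===== VERDICT (by name: the statement is the Claim_ definition above) =====
theorem post_preprocess_entities_spec : Claim_equal_post_preprocess_entities := by
  intro li _hdom _hpre
  unfold Spec_post_preprocess_entities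
  show post_preprocess_entities li = post_preprocess_entities_alt li
  have hA : post_preprocess_entities li =
      li.foldl (fun a e => a ++ [pvA (li.foldl pvCStep PySem.Dict.empty) e]) [] := rfl
  have hBw : ((li.foldl pvCStep PySem.Dict.empty).items.foldl
        (fun w p =>
          if 1 < p.2.size then
            match PySem.List.max? p.2.items (fun x => x.2) with
            | some best => if 1 < best.2 then w.insert p.1 best.1 else w
            | none => w
          else w) PySem.Dict.empty) =
      ((li.foldl pvCStep PySem.Dict.empty).items.foldl pvWStep PySem.Dict.empty) := by
    congr 1
    funext w p
    exact pvWStep_eq_B w p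
  have hB : post_preprocess_entities_alt li =
      li.map (pvB ((li.foldl pvCStep PySem.Dict.empty).items.foldl pvWStep PySem.Dict.empty)) := by
    show (li.map (pvB ((li.foldl pvCStep PySem.Dict.empty).items.foldl
        (fun w p =>
          if 1 < p.2.size then
            match PySem.List.max? p.2.items (fun x => x.2) with
            | some best => if 1 < best.2 then w.insert p.1 best.1 else w
            | none => w
          else w) PySem.Dict.empty))) = _
    rw [hBw]
  rw [hA, hB, foldl_append_eq_map, List.nil_append]
  exact List.map_congr_left (fun ent hmem => pvA_eq_pvB li ent hmem)
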